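-- pv_equiv track=rewrite | github.com/hugoalmx/questoesccalgoritimos | Trabalho/AFN4.PY | mt_termina_com_bab
-- ===== SOURCE A (Python) =====
-- def mt_termina_com_bab(palavra):
--     # Definindo os estados
--     estado = "q0"  # Estado inicial
--
--     # Percorrendo a palavra, caractere por caractere
--     for simbolo in palavra:
--         if estado == "q0":
--             if simbolo == "b":
--                 estado = "q1"
--             elif simbolo == "a":
--                 estado = "q0"  # Permanece no estado q0 se encontrar 'a'
--             else:
--                 estado = "q_rejeitado"  # Caractere inválido, rejeita a palavra
--
--         elif estado == "q1":
--             if simbolo == "a":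
--                 estado = "q2"
--             elif simbolo == "b":
--                 estado = "q1"  # Permanece em q1 se encontrar 'b'
--             else:
--                 estado = "q_rejeitado"  # Caractere inválido, rejeita a palavra
--
--         elif estado == "q2":
--             if simbolo == "b":
--                 estado = "q3"  # Se encontrar 'b' vai para o estado de aceitação
--             elif simbolo == "a":
--                 estado = "q2"  # Permanece em q2 se encontrar 'a'
--             else:
--                 estado = "q_rejeitado"  # Caractere inválido, rejeita a palavra
--
--         elif estado == "q3":
--             if simbolo == "b":
--                 estado = "q1"  # Se encontrar 'b', volta ao estado q1
--             elif simbolo == "a":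
--                 estado = "q2"  # Se encontrar 'a', vai para o estado q2
--             else:
--                 estado = "q_rejeitado"  # Caractere inválido, rejeita a palavra
--
--         if estado == "q_rejeitado":
--             return False  # A palavra foi rejeitada
--
--     # Aceita a palavra se terminou no estado final q3
--     return estado == "q3"
-- ===== SOURCE B (Python) =====
-- def mt_termina_com_bab(palavra):
--     # Validate the alphabet first (A rejects on any invalid symbol), then a plain suffix check.
--     if any(c not in "ab" for c in palavra):
--         return False
--     return palavra.endswith("bab")
-- ===== Notes on version B (the rewrite author's own statement) =====
-- stated objective: simpler
-- what changed: Replaces the hand-written four-state DFA transition chain by an alphabet check plus a direct endswith('bab') suffix test.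
-- intended difference: On words over the alphabet {a,b} that end in one b, then two or more a-letters, then a final b (for example the witness baab), A returns True because its state q2 wrongly loops on the letter a; such words do not end in the suffix bab, so B returns False, which is the intended value for a recogniser of words ending in bab. — e.g. on mt_termina_com_bab("baab"): A returns true, B returns false
import Mathlib
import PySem

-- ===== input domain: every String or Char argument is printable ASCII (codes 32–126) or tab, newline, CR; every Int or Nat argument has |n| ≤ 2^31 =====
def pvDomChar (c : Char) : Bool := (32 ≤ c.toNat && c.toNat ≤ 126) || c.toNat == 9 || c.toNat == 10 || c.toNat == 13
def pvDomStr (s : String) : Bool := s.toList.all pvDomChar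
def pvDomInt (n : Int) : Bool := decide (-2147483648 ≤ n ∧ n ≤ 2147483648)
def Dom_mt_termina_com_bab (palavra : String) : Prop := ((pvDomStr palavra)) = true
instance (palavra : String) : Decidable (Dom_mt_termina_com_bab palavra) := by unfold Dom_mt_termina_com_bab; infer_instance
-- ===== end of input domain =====

-- B replaces A's four-state DFA by an alphabet check plus a direct 'endswith "bab"' suffix test (simpler).

-- ===== PORT A =====
-- One transition of A's loop body: the same branch chain, in the same order.
-- (Python's early 'return False' on reaching "q_rejeitado" is transcribed by the final
-- 'else estado' branch: "q_rejeitado" matches no state test, so it is absorbing, and the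
-- final check 'estado == "q3"' then yields False, exactly the early return's value.)
def mtStep (estado : String) (simbolo : Char) : String :=
  if estado = "q0" then
    (if simbolo = 'b' then "q1" else if simbolo = 'a' then "q0" else "q_rejeitado")
  else if estado = "q1" then
    (if simbolo = 'a' then "q2" else if simbolo = 'b' then "q1" else "q_rejeitado")
  else if estado = "q2" then
    (if simbolo = 'b' then "q3" else if simbolo = 'a' then "q2" else "q_rejeitado")
  else if estado = "q3" then
    (if simbolo = 'b' then "q1" else if simbolo = 'a' then "q2" else "q_rejeitado")
  else estado

def mt_termina_com_bab (palavra : String) : Bool :=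
  (palavra.toList.foldl mtStep "q0") == "q3"

-- ===== PORT B =====
def mt_termina_com_bab_alt (palavra : String) : Bool :=
  if palavra.toList.any (fun c => !(c == 'a' || c == 'b')) then false
  else PySem.Str.endswith palavra "bab"

-- ===== PRECONDITION & SPEC =====
-- On words over the alphabet {a,b} that end in one b, then two or more a-letters, then a
-- final b (for example the witness baab), A returns True because its state q2 wrongly loops
-- on the letter a; B returns False, the intended value for a recogniser of words ending in bab.
def D_mt_termina_com_bab (palavra : String) : Prop :=
  palavra.toList.all (fun c => c == 'a' || c == 'b') = true ∧
  palavra.toList.reverse.head? = some 'b' ∧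
  2 ≤ (palavra.toList.reverse.tail.takeWhile (· == 'a')).length ∧
  (palavra.toList.reverse.tail.dropWhile (· == 'a')).head? = some 'b'
instance (palavra : String) : Decidable (D_mt_termina_com_bab palavra) := by
  unfold D_mt_termina_com_bab; infer_instance

def Spec_mt_termina_com_bab (palavra : String) (out : Bool) : Prop :=
  ¬ D_mt_termina_com_bab palavra → out = mt_termina_com_bab_alt palavra
instance (palavra : String) (out : Bool) : Decidable (Spec_mt_termina_com_bab palavra out) := by
  unfold Spec_mt_termina_com_bab; infer_instance

def pvDiffWitness_mt_termina_com_bab : String := "baab"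
def pvDiffWitnessOut_mt_termina_com_bab : Bool × Bool := (true, false)

-- ===== CLAIM (what is proved, stated in full; the proofs are below) =====
def Claim_unchanged_mt_termina_com_bab : Prop := ∀ (palavra : String), Dom_mt_termina_com_bab palavra → Spec_mt_termina_com_bab palavra (mt_termina_com_bab palavra)
def Claim_changed_mt_termina_com_bab : Prop := Dom_mt_termina_com_bab (pvDiffWitness_mt_termina_com_bab) ∧ D_mt_termina_com_bab (pvDiffWitness_mt_termina_com_bab) ∧ mt_termina_com_bab (pvDiffWitness_mt_termina_com_bab) = pvDiffWitnessOut_mt_termina_com_bab.1 ∧ mt_termina_com_bab_alt (pvDiffWitness_mt_termina_com_bab) = pvDiffWitnessOut_mt_termina_com_bab.2 ∧ pvDiffWitnessOut_mt_termina_com_bab.1 ≠ pvDiffWitnessOut_mt_termina_com_bab.2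
def Claim_exact_mt_termina_com_bab : Prop := ∀ (palavra : String), Dom_mt_termina_com_bab palavra → D_mt_termina_com_bab palavra → mt_termina_com_bab palavra ≠ mt_termina_com_bab_alt palavra

-- ===== LEMMAS AND PROOFS =====

-- state of A's DFA after reading a word whose REVERSE is r (valid words only)
def mtState (r : List Char) : String :=
  match r with
  | [] => "q0"
  | c :: t =>
    if c = 'b' then
      if 1 ≤ (t.takeWhile (· == 'a')).length ∧ (t.dropWhile (· == 'a')).head? = some 'b'
      then "q3" else "q1"
    else
      if (t.dropWhile (· == 'a')).head? = some 'b' then "q2" else "q0"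

theorem all_valid_iff (l : List Char) :
    l.all (fun c => c == 'a' || c == 'b') = true ↔ ∀ c ∈ l, c = 'a' ∨ c = 'b' := by
  simp

theorem mtStep_rejeitado (c : Char) : mtStep "q_rejeitado" c = "q_rejeitado" := by
  simp [mtStep]

theorem foldl_rejeitado (l : List Char) :
    l.foldl mtStep "q_rejeitado" = "q_rejeitado" := by
  induction l with
  | nil => rfl
  | cons c t ih => simpa [List.foldl, mtStep_rejeitado] using ih

theorem foldl_invalid (l : List Char) (s : String)
    (hs : s = "q0" ∨ s = "q1" ∨ s = "q2" ∨ s = "q3")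
    (h : ∃ c ∈ l, ¬ (c = 'a' ∨ c = 'b')) :
    l.foldl mtStep s = "q_rejeitado" := by
  induction l generalizing s with
  | nil => simp at h
  | cons c t ih =>
    by_cases hc : c = 'a' ∨ c = 'b'
    · have ht : ∃ c ∈ t, ¬ (c = 'a' ∨ c = 'b') := by
        rcases h with ⟨d, hd, hdv⟩
        rcases List.mem_cons.mp hd with rfl | hd'
        · exact absurd hc hdv
        · exact ⟨d, hd', hdv⟩
      have : mtStep s c = "q0" ∨ mtStep s c = "q1" ∨ mtStep s c = "q2" ∨ mtStep s c = "q3" := by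
        rcases hs with rfl | rfl | rfl | rfl <;> rcases hc with rfl | rfl <;> simp [mtStep]
      simpa [List.foldl] using ih (mtStep s c) this ht
    · have : mtStep s c = "q_rejeitado" := by
        push_neg at hc
        rcases hs with rfl | rfl | rfl | rfl <;> simp [mtStep, hc.1, hc.2]
      simp [List.foldl, this, foldl_rejeitado]

theorem mtStep_state (r : List Char) (c : Char)
    (hr : ∀ d ∈ r, d = 'a' ∨ d = 'b') (hc : c = 'a' ∨ c = 'b') :
    mtStep (mtState r) c = mtState (c :: r) := by
  rcases hc with rfl | rfl
  · -- c = 'a'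
    cases r with
    | nil => simp [mtState, mtStep]
    | cons d t =>
      have hd := hr d (List.mem_cons_self ..)
      rcases hd with rfl | rfl
      · -- r starts with 'a'
        by_cases h2 : (t.dropWhile (· == 'a')).head? = some 'b' <;>
          simp [mtState, mtStep, h2, List.dropWhile]
      · -- r starts with 'b'
        by_cases h2 : 1 ≤ (t.takeWhile (· == 'a')).length ∧
            (t.dropWhile (· == 'a')).head? = some 'b' <;>
          simp [mtState, mtStep, h2, List.dropWhile]
  · -- c = 'b'
    cases r with
    | nil => simp [mtState, mtStep, List.takeWhile, List.dropWhile]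
    | cons d t =>
      have hd := hr d (List.mem_cons_self ..)
      rcases hd with rfl | rfl
      · -- r starts with 'a' : old state q2 or q0
        by_cases h2 : (t.dropWhile (· == 'a')).head? = some 'b'
        · simp [mtState, mtStep, h2, List.takeWhile, List.dropWhile]
        · simp [mtState, mtStep, h2, List.takeWhile, List.dropWhile]
      · -- r starts with 'b' : old state q3 or q1; new state q1 either way
        by_cases h2 : 1 ≤ (t.takeWhile (· == 'a')).length ∧
            (t.dropWhile (· == 'a')).head? = some 'b' <;>
          simp [mtState, mtStep, h2, List.takeWhile, List.dropWhile]

theorem foldl_mtState (l : List Char) (hl : ∀ d ∈ l, d = 'a' ∨ d = 'b') :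
    l.foldl mtStep "q0" = mtState l.reverse := by
  induction l using List.reverseRecOn with
  | nil => rfl
  | append_singleton t c ih =>
    have ht : ∀ d ∈ t, d = 'a' ∨ d = 'b' := fun d hd => hl d (by simp [hd])
    have hc : c = 'a' ∨ c = 'b' := hl c (by simp)
    have hrt : ∀ d ∈ t.reverse, d = 'a' ∨ d = 'b' := by
      intro d hd; exact ht d (List.mem_reverse.mp hd)
    rw [List.foldl_append, List.foldl_cons, List.foldl_nil, ih ht,
      mtStep_state t.reverse c hrt hc]
    simp

-- suffix "bab" in terms of the reversed character list
theorem endswith_iff_reverse (l : List Char) :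
    (['b', 'a', 'b'] <:+ l) ↔ ['b', 'a', 'b'] <+: l.reverse := by
  constructor
  · intro h
    have := List.reverse_prefix.mpr (by simpa using h)
    simpa using this
  · intro h
    have := List.reverse_suffix.mpr (by simpa using h)
    simpa using this

theorem valid_state_cases (l : List Char) (hl : ∀ d ∈ l, d = 'a' ∨ d = 'b')
    (hnd : ¬ (l.reverse.head? = some 'b' ∧
      2 ≤ (l.reverse.tail.takeWhile (· == 'a')).length ∧
      (l.reverse.tail.dropWhile (· == 'a')).head? = some 'b')) :
    (mtState l.reverse == "q3") = decide (['b', 'a', 'b'] <+: l.reverse) := by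
  cases hrev : l.reverse with
  | nil => simp [mtState]
  | cons c t =>
    by_cases hc : c = 'b'
    · subst hc
      by_cases h2 : 1 ≤ (t.takeWhile (· == 'a')).length ∧
          (t.dropWhile (· == 'a')).head? = some 'b'
      · -- state q3; since ¬D the run of a's has length exactly 1, so t = 'a' :: 'b' :: _
        have hk : (t.takeWhile (· == 'a')).length = 1 := by
          have : ¬ 2 ≤ (t.takeWhile (· == 'a')).length := by
            intro h; exact hnd ⟨by simp [hrev], by simpa [hrev] using h, by simpa [hrev] using h2.2⟩
          omega
        obtain ⟨x, hx⟩ : ∃ x, t.takeWhile (· == 'a') = [x] :=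
          List.length_eq_one_iff.mp hk
        have hxa : x = 'a' := by
          have hmem : x ∈ t.takeWhile (· == 'a') := by simp [hx]
          have := List.mem_takeWhile_imp hmem
          simpa using this
        subst hxa
        obtain ⟨u, hu⟩ : ∃ u, t.dropWhile (· == 'a') = 'b' :: u := by
          cases hdw : t.dropWhile (· == 'a') with
          | nil => simp [hdw] at h2
          | cons y u =>
            have hy : y = 'b' := by
              have := h2.2; rw [hdw] at this; simpa using this
            subst hy
            exact ⟨u, rfl⟩
        have ht : t = 'a' :: 'b' :: u := by
          have h := List.takeWhile_append_dropWhile (p := (· == 'a')) (l := t)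
          rw [hx, hu] at h
          simpa using h.symm
        simp [mtState, h2, ht, List.prefix_iff_eq_take]
      · -- state q1; ¬(bab prefix of reverse) since that would put us in q3
        have hnp : ¬ ['b', 'a', 'b'] <+: 'b' :: t := by
          intro hp
          obtain ⟨u, hu⟩ := hp
          have ht : t = 'a' :: 'b' :: u := by
            simpa using hu.symm
          apply h2
          constructor
          · rw [ht]; simp [List.takeWhile]
          · rw [ht]; simp [List.dropWhile]
        simp [mtState, h2, hnp]
    · -- c = 'a' (valid): state q2 or q0, never q3; and reverse can't start with 'b'
      have hca : c = 'a' := by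
        have := hl c (by rw [← List.mem_reverse, hrev]; simp)
        tauto
      subst hca
      have hnp : ¬ ['b', 'a', 'b'] <+: 'a' :: t := by
        intro hp; obtain ⟨u, hu⟩ := hp; simp at hu
      by_cases h2 : (t.dropWhile (· == 'a')).head? = some 'b' <;>
        simp [mtState, h2, hnp]

-- endswith "bab" as a decide over the reversed character list, on valid words
theorem alt_valid (palavra : String)
    (hv : ∀ d ∈ palavra.toList, d = 'a' ∨ d = 'b') :
    mt_termina_com_bab_alt palavra
      = decide (['b', 'a', 'b'] <+: palavra.toList.reverse) := by
  have hany : palavra.toList.any (fun c => !(c == 'a' || c == 'b')) = false := by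
    simp only [List.any_eq_false]
    intro c hc
    rcases hv c hc with rfl | rfl <;> simp
  have hbl : "bab".toList = ['b', 'a', 'b'] := rfl
  have he : (PySem.Str.endswith palavra "bab" = true) ↔
      (['b', 'a', 'b'] <:+ palavra.toList) := by
    rw [PySem.Str.endswith_eq, hbl]
    exact PySem.Chars.endswith_iff _ _
  unfold mt_termina_com_bab_alt
  rw [hany]
  simp only [Bool.false_eq_true, if_false]
  by_cases hsuf : (['b', 'a', 'b'] : List Char) <:+ palavra.toList
  · rw [he.mpr hsuf, decide_eq_true ((endswith_iff_reverse palavra.toList).mp hsuf)]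
  · have h1 : PySem.Str.endswith palavra "bab" = false := by
      cases h : PySem.Str.endswith palavra "bab"
      · rfl
      · exact absurd (he.mp h) hsuf
    have h2 : ¬ ['b', 'a', 'b'] <+: palavra.toList.reverse :=
      fun hp => hsuf ((endswith_iff_reverse palavra.toList).mpr hp)
    rw [h1, decide_eq_false h2]

-- ===== VERDICT (by name: the statement is the Claim_ definition above) =====
theorem mt_termina_com_bab_spec : Claim_unchanged_mt_termina_com_bab := by
  intro palavra _ hnd
  by_cases hv : ∀ d ∈ palavra.toList, d = 'a' ∨ d = 'b'
  · have hnd' : ¬ (palavra.toList.reverse.head? = some 'b' ∧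
        2 ≤ (palavra.toList.reverse.tail.takeWhile (· == 'a')).length ∧
        (palavra.toList.reverse.tail.dropWhile (· == 'a')).head? = some 'b') :=
      fun h => hnd ⟨(all_valid_iff _).mpr hv, h.1, h.2.1, h.2.2⟩
    unfold mt_termina_com_bab
    rw [foldl_mtState _ hv, valid_state_cases _ hv hnd', alt_valid palavra hv]
  · have hex : ∃ c ∈ palavra.toList, ¬ (c = 'a' ∨ c = 'b') := by
      push_neg at hv
      obtain ⟨c, hc, h1, h2⟩ := hv
      exact ⟨c, hc, by simp [h1, h2]⟩
    have hA : mt_termina_com_bab palavra = false := by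
      unfold mt_termina_com_bab
      rw [foldl_invalid _ _ (Or.inl rfl) hex]
      decide
    have hany : palavra.toList.any (fun c => !(c == 'a' || c == 'b')) = true := by
      obtain ⟨c, hc, h⟩ := hex
      push_neg at h
      exact List.any_eq_true.mpr ⟨c, hc, by simp [h.1, h.2]⟩
    have hB : mt_termina_com_bab_alt palavra = false := by
      unfold mt_termina_com_bab_alt
      rw [hany]
      rfl
    rw [hA, hB]

set_option maxRecDepth 4096 in
theorem mt_termina_com_bab_changed : Claim_changed_mt_termina_com_bab := by
  unfold Claim_changed_mt_termina_com_bab; decide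

theorem mt_termina_com_bab_tight : Claim_exact_mt_termina_com_bab := by
  intro palavra _ hd
  obtain ⟨hvb, hh, hk, hdw⟩ := hd
  have hv : ∀ d ∈ palavra.toList, d = 'a' ∨ d = 'b' := (all_valid_iff _).mp hvb
  cases hrev : palavra.toList.reverse with
  | nil => rw [hrev] at hh; simp at hh
  | cons c t =>
    rw [hrev] at hh hk hdw
    have hc : c = 'b' := by simpa using hh
    subst hc
    simp only [List.tail_cons] at hk hdw
    -- A is in state q3
    have hA : mt_termina_com_bab palavra = true := by
      unfold mt_termina_com_bab
      rw [foldl_mtState _ hv, hrev]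
      have h1 : 1 ≤ (t.takeWhile (· == 'a')).length := by omega
      simp [mtState, h1, hdw]
    -- t starts with two 'a's, so "bab" is not a suffix
    have ht2 : ∃ u, t = 'a' :: 'a' :: u := by
      cases htw : t.takeWhile (· == 'a') with
      | nil => rw [htw] at hk; simp at hk
      | cons x rest =>
        cases rest with
        | nil => rw [htw] at hk; simp at hk
        | cons y rest2 =>
          have hx : x = 'a' := by
            have := List.mem_takeWhile_imp (l := t) (p := (· == 'a'))
              (by simp [htw] : x ∈ t.takeWhile (· == 'a'))
            simpa using this
          have hy : y = 'a' := by
            have := List.mem_takeWhile_imp (l := t) (p := (· == 'a'))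
              (by simp [htw] : y ∈ t.takeWhile (· == 'a'))
            simpa using this
          obtain ⟨u, hu⟩ := List.takeWhile_prefix (l := t) (p := (· == 'a'))
          refine ⟨rest2 ++ u, ?_⟩
          rw [← hu, htw, hx, hy]
          simp
    obtain ⟨u, hu⟩ := ht2
    have hnp : ¬ ['b', 'a', 'b'] <+: palavra.toList.reverse := by
      rw [hrev, hu]
      intro hp
      obtain ⟨w, hw⟩ := hp
      simp at hw
    have hB : mt_termina_com_bab_alt palavra = false := by
      rw [alt_valid palavra hv]
      simp [hnp]
    rw [hA, hB]
    simp
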